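-- pv_equiv track=rewrite | github.com/firekg/is-it-optimal | Observe.py | Observe
-- ===== SOURCE A (Python) =====
-- def Observe(hypo_map, true_hypo, target_feature_set):
--       list = []
--       label_map = { }
--
--       # Get a list of hypothesis
--       for feature in target_feature_set:
--             label_map[feature] = true_hypo[feature]
--
--       for hypo in hypo_map:
--             check = True
--             for feature in target_feature_set:
--                   if hypo[feature] != label_map[feature]:
--                         check = False
--             if check:
--                   list.append(hypo)
--       return 1 if len(list) == 1 else 0
-- ===== SOURCE B (Python) =====
-- def Observe(hypo_map, true_hypo, target_feature_set):
--     counts = {}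
--     for hypo in hypo_map:
--         sig = tuple(hypo[f] for f in target_feature_set)
--         counts[sig] = counts.get(sig, 0) + 1
--     target_sig = tuple(true_hypo[f] for f in target_feature_set)
--     return 1 if counts.get(target_sig, 0) == 1 else 0
-- ===== Notes on version B (the rewrite author's own statement) =====
-- stated objective: idiomatic
-- what changed: B replaces A's label_map plus per-hypothesis feature-by-feature comparison and matching-list accumulation with a single group-by pass that counts hypotheses by their feature-signature tuple, followed by one lookup of the target signature.
import Mathlib
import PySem

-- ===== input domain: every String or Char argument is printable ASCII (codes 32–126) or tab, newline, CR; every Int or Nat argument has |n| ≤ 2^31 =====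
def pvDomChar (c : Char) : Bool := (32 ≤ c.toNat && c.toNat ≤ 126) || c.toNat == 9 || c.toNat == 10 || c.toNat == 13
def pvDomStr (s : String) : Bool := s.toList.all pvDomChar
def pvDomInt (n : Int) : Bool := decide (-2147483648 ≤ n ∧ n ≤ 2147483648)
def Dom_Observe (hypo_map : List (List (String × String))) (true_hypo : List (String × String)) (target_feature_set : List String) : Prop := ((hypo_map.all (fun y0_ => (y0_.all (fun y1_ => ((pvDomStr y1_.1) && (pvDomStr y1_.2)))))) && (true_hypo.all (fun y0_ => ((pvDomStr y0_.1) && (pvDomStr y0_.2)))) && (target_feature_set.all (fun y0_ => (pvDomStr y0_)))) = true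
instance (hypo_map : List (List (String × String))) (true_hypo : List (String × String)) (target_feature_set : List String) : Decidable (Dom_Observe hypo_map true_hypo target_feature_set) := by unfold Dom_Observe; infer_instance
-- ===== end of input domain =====

-- B groups hypotheses by their feature-signature in one counting pass and looks the target
-- signature up once, instead of A's label_map + per-hypothesis comparison loop (idiomatic).

-- ===== PORT A =====
-- dict lookup d[k] on an association list: first match; "" only where Python raises KeyError (excluded by Pre_)
def pvLookup (d : List (String × String)) (k : String) : String :=
  ((d.find? (fun p => p.1 == k)).map (·.2)).getD ""

def Observe (hypo_map : List (List (String × String))) (true_hypo : List (String × String)) (target_feature_set : List String) : Int :=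
  let label_map : PySem.Dict String String :=
    target_feature_set.foldl (fun d f => d.insert f (pvLookup true_hypo f)) PySem.Dict.empty
  let lst : List (List (String × String)) :=
    hypo_map.foldl (fun acc hypo =>
      if target_feature_set.foldl
          (fun c f => if pvLookup hypo f ≠ label_map.getD f "" then false else c) true
      then acc ++ [hypo] else acc) []
  if lst.length = 1 then 1 else 0

-- ===== PORT B =====
-- sig = tuple(hypo[f] for f in target_feature_set)
def pvSig (target_feature_set : List String) (hypo : List (String × String)) : List String :=
  target_feature_set.map (fun f => pvLookup hypo f)

def Observe_alt (hypo_map : List (List (String × String))) (true_hypo : List (String × String)) (target_feature_set : List String) : Int :=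
  let counts : PySem.Dict (List String) Int :=
    hypo_map.foldl (fun d hypo =>
      d.insert (pvSig target_feature_set hypo) (d.getD (pvSig target_feature_set hypo) 0 + 1)) PySem.Dict.empty
  if counts.getD (pvSig target_feature_set true_hypo) 0 = 1 then 1 else 0

-- ===== PRECONDITION & SPEC =====
-- Pre_ excludes exactly the inputs where Python A raises KeyError: some target feature
-- missing from true_hypo or from some hypothesis in hypo_map.
def Pre_Observe (hypo_map : List (List (String × String))) (true_hypo : List (String × String)) (target_feature_set : List String) : Prop :=
  ∀ f ∈ target_feature_set,
    (true_hypo.find? (fun p => p.1 == f)).isSome ∧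
    ∀ h ∈ hypo_map, (h.find? (fun p => p.1 == f)).isSome
instance (hypo_map : List (List (String × String))) (true_hypo : List (String × String)) (target_feature_set : List String) : Decidable (Pre_Observe hypo_map true_hypo target_feature_set) := by unfold Pre_Observe; infer_instance

def pvWitness_Observe : (List (List (String × String))) × (List (String × String)) × List String :=
  ([[("a", "x")], [("a", "y")]], [("a", "x")], ["a"])

def Spec_Observe (hypo_map : List (List (String × String))) (true_hypo : List (String × String)) (target_feature_set : List String) (out : Int) : Prop := out = Observe_alt hypo_map true_hypo target_feature_set
instance (hypo_map : List (List (String × String))) (true_hypo : List (String × String)) (target_feature_set : List String) (out : Int) : Decidable (Spec_Observe hypo_map true_hypo target_feature_set out) := by unfold Spec_Observe; infer_instance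

-- ===== CLAIM (what is proved, stated in full; the proofs are below) =====
def Claim_equal_Observe : Prop := ∀ (hypo_map : List (List (String × String))) (true_hypo : List (String × String)) (target_feature_set : List String), Dom_Observe hypo_map true_hypo target_feature_set → Pre_Observe hypo_map true_hypo target_feature_set → Spec_Observe hypo_map true_hypo target_feature_set (Observe hypo_map true_hypo target_feature_set)

-- ===== LEMMAS AND PROOFS =====
-- the label_map fold leaves keys outside fs untouched …
theorem pv_getD_label_not_mem (fs : List String) (v : String → String)
    (d : PySem.Dict String String) (k : String) (hk : k ∉ fs) :
    (fs.foldl (fun d f => d.insert f (v f)) d).getD k "" = d.getD k "" := by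
  induction fs generalizing d with
  | nil => rfl
  | cons f fs ih =>
    simp only [List.mem_cons, not_or] at hk
    simp only [List.foldl_cons]
    rw [ih _ hk.2, PySem.Dict.getD_insert_of_ne _ _ _ hk.1]

-- … and stores v k at every k ∈ fs
theorem pv_getD_label (fs : List String) (v : String → String)
    (d : PySem.Dict String String) (k : String) (hk : k ∈ fs) :
    (fs.foldl (fun d f => d.insert f (v f)) d).getD k "" = v k := by
  induction fs generalizing d with
  | nil => cases hk
  | cons f fs ih =>
    simp only [List.foldl_cons]
    by_cases h : k ∈ fs
    · exact ih _ h
    · have hkf : k = f := by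
        rcases List.mem_cons.mp hk with h' | h'
        · exact h'
        · exact absurd h' h
      subst hkf
      rw [pv_getD_label_not_mem fs v _ k h, PySem.Dict.getD_insert_self]

-- A's check loop is an 'all' over the features
theorem pv_check_fold (fs : List String) (a b : String → String) (init : Bool) :
    fs.foldl (fun c f => if a f ≠ b f then false else c) init
      = (init && fs.all (fun f => a f == b f)) := by
  induction fs generalizing init with
  | nil => simp
  | cons f fs ih =>
    simp only [List.foldl_cons, List.all_cons, ih]
    by_cases h : a f = b f <;> simp [h]

-- check hypo = true iff hypo's signature equals the target signature
theorem pv_check_eq_sig (fs : List String) (th hypo : List (String × String)) :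
    (fs.all (fun f => pvLookup hypo f ==
        (fs.foldl (fun d f => d.insert f (pvLookup th f)) PySem.Dict.empty).getD f ""))
      = decide (pvSig fs hypo = pvSig fs th) := by
  rw [Bool.eq_iff_iff]
  simp only [List.all_eq_true, beq_iff_eq, decide_eq_true_eq, pvSig, List.map_eq_map_iff]
  constructor
  · intro h f hf
    have := h f hf
    rwa [pv_getD_label fs (fun f => pvLookup th f) _ f hf] at this
  · intro h f hf
    rw [pv_getD_label fs (fun f => pvLookup th f) _ f hf]
    exact h f hf

theorem Observe_eq (hypo_map : List (List (String × String))) (true_hypo : List (String × String)) (target_feature_set : List String) :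
    Observe hypo_map true_hypo target_feature_set = Observe_alt hypo_map true_hypo target_feature_set := by
  unfold Observe Observe_alt
  simp only [pv_check_fold, Bool.true_and, pv_check_eq_sig]
  have hA := PySem.List.foldl_append_if
    (fun hypo => decide (pvSig target_feature_set hypo = pvSig target_feature_set true_hypo))
    (id) hypo_map []
  simp only [id_eq, List.map_id, List.nil_append] at hA
  rw [hA]
  have hB := PySem.Dict.getD_foldl_insert_add_one
    (hypo_map.map (pvSig target_feature_set)) PySem.Dict.empty
    (pvSig target_feature_set true_hypo)
  rw [List.foldl_map] at hB
  rw [hB]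
  simp only [PySem.Dict.getD_empty, zero_add, List.count_eq_countP, List.countP_map,
    ← List.countP_eq_length_filter, Nat.cast_eq_one, Function.comp_def]
  have hc : List.countP (fun hypo => decide (pvSig target_feature_set hypo = pvSig target_feature_set true_hypo)) hypo_map
      = List.countP (fun x => pvSig target_feature_set x == pvSig target_feature_set true_hypo) hypo_map :=
    List.countP_congr (fun x _ => by simp)
  rw [hc]

-- ===== VERDICT (by name: the statement is the Claim_ definition above) =====
theorem Observe_spec : Claim_equal_Observe := by
  intro hypo_map true_hypo target_feature_set _ _
  exact Observe_eq hypo_map true_hypo target_feature_set
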